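-- pv_equiv track=rewrite | github.com/aniramm/tmv-annotator | tmv-annotator-tool/TMV-FR.py | checkCoordVCs
-- ===== SOURCE A (Python) =====
-- def checkCoordVCs(verb_seqs):
--     res = False
--
--     for i in verb_seqs:
--         for j in verb_seqs:
--             if i != j:
--                 for k in i:
--                     if k in j:
--                         res = True
--                         # print k, res
--     return res
-- ===== SOURCE B (Python) =====
-- def checkCoordVCs(verb_seqs):
--     # element -> first sequence (by position) that contains it
--     owner = {}
--     for seq in verb_seqs:
--         for k in seq:
--             prev = owner.get(k)
--             if prev is None:
--                 owner[k] = seq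
--             elif prev != seq:
--                 return True
--     return False
-- ===== Notes on version B (the rewrite author's own statement) =====
-- stated objective: faster
-- what changed: Replaced the triple nested scan over all sequence pairs by a single pass that indexes each element to the first sequence containing it in a dict, returning True as soon as an element recurs in a different sequence.
import Mathlib
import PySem

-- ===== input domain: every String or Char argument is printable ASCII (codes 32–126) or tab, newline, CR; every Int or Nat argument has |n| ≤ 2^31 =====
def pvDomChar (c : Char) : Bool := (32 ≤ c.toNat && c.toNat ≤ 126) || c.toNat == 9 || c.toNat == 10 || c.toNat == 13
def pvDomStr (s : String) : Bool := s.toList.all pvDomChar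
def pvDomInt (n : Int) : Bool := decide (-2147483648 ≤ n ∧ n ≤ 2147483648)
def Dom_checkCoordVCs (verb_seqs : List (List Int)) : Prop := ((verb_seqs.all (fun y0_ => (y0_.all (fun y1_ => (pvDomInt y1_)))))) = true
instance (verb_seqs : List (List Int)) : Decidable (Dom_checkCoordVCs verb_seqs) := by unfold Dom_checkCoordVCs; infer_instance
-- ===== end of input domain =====

-- B replaces A's triple nested scan by one pass with a dict mapping each element
-- to the first sequence containing it (objective: faster, asymptotic).

-- ===== PORT A =====
def checkCoordVCs (verb_seqs : List (List Int)) : Bool :=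
  verb_seqs.foldl (fun res i =>
    verb_seqs.foldl (fun res j =>
      if i ≠ j then
        i.foldl (fun res k => if j.contains k then true else res) res
      else res) res) false

-- ===== PORT B =====
-- inner loop of Source B: for k in seq — returns none when B returns True
def altInner (seq : List Int) : List Int → PySem.Dict Int (List Int) → Option (PySem.Dict Int (List Int))
  | [], owner => some owner
  | k :: ks, owner =>
    match owner.get? k with
    | none => altInner seq ks (owner.insert k seq)
    | some prev => if prev ≠ seq then none else altInner seq ks owner

-- outer loop of Source B
def altOuter : List (List Int) → PySem.Dict Int (List Int) → Bool
  | [], _ => false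
  | seq :: rest, owner =>
    match altInner seq seq owner with
    | none => true
    | some owner' => altOuter rest owner'

def checkCoordVCs_alt (verb_seqs : List (List Int)) : Bool :=
  altOuter verb_seqs PySem.Dict.empty

-- ===== PRECONDITION & SPEC =====
def Spec_checkCoordVCs (verb_seqs : List (List Int)) (out : Bool) : Prop := out = checkCoordVCs_alt verb_seqs
instance (verb_seqs : List (List Int)) (out : Bool) : Decidable (Spec_checkCoordVCs verb_seqs out) := by unfold Spec_checkCoordVCs; infer_instance

-- ===== CLAIM (what is proved, stated in full; the proofs are below) =====
def Claim_equal_checkCoordVCs : Prop := ∀ (verb_seqs : List (List Int)), Dom_checkCoordVCs verb_seqs → Spec_checkCoordVCs verb_seqs (checkCoordVCs verb_seqs)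

-- ===== LEMMAS AND PROOFS =====

-- both programs decide this proposition
def Share (l : List (List Int)) : Prop :=
  ∃ i ∈ l, ∃ j ∈ l, i ≠ j ∧ ∃ k, k ∈ i ∧ k ∈ j

-- first sequence of l containing k (abstract model of B's dict)
def fo (l : List (List Int)) (k : Int) : Option (List Int) :=
  (l.filter (fun s => s.contains k)).head?

lemma foldA1 (j : List Int) : ∀ (i : List Int) (r : Bool),
    i.foldl (fun res k => if j.contains k then true else res) r
      = (r || i.any (fun k => j.contains k)) := by
  intro i
  induction i with
  | nil => intro r; simp
  | cons k ks ih =>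
    intro r
    rw [List.foldl_cons, List.any_cons]
    cases hc : j.contains k
    · rw [if_neg (by simp), ih]
      simp
    · rw [if_pos rfl, ih]
      simp

lemma foldA2 (i : List Int) : ∀ (m : List (List Int)) (r : Bool),
    m.foldl (fun res j =>
      if i ≠ j then i.foldl (fun res k => if j.contains k then true else res) res else res) r
      = (r || m.any (fun j => decide (i ≠ j) && i.any (fun k => j.contains k))) := by
  intro m
  induction m with
  | nil => intro r; simp
  | cons j js ih =>
    intro r
    rw [List.foldl_cons, List.any_cons]
    by_cases h : i = j
    · rw [if_neg (by simp [h]), ih]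
      simp [h]
    · rw [if_pos h, foldA1, ih]
      simp [h, Bool.or_assoc]

lemma foldA3 (l : List (List Int)) : ∀ (m : List (List Int)) (r : Bool),
    m.foldl (fun res i =>
      l.foldl (fun res j =>
        if i ≠ j then i.foldl (fun res k => if j.contains k then true else res) res else res) res) r
      = (r || m.any (fun i => l.any (fun j => decide (i ≠ j) && i.any (fun k => j.contains k)))) := by
  intro m
  induction m with
  | nil => intro r; simp
  | cons i is ih =>
    intro r
    rw [List.foldl_cons, List.any_cons, foldA2, ih]
    simp [Bool.or_assoc]

lemma checkA_iff (l : List (List Int)) : checkCoordVCs l = true ↔ Share l := by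
  unfold checkCoordVCs
  rw [foldA3]
  simp [Share]

lemma fo_mem {l : List (List Int)} {k : Int} {v : List Int} (h : fo l k = some v) :
    v ∈ l ∧ k ∈ v := by
  unfold fo at h
  have hv := List.mem_of_mem_head? h
  have := List.of_mem_filter hv
  refine ⟨List.mem_of_mem_filter hv, ?_⟩
  simpa using this

lemma fo_isSome {l : List (List Int)} {k : Int} {i : List Int} (hi : i ∈ l) (hk : k ∈ i) :
    (fo l k).isSome := by
  unfold fo
  have hmem : i ∈ l.filter (fun s => s.contains k) := by
    simp [List.mem_filter, hi, hk]
  cases hf : l.filter (fun s => s.contains k) with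
  | nil => rw [hf] at hmem; simp at hmem
  | cons a t => simp

lemma fo_append_singleton (l : List (List Int)) (s : List Int) (k : Int) :
    fo (l ++ [s]) k = (fo l k).or (if k ∈ s then some s else none) := by
  unfold fo
  rw [List.filter_append, List.head?_append]
  by_cases h : k ∈ s <;> simp [h, Option.or]

-- inner loop: returns none iff some element already has a different owner
lemma altInner_none_iff (seq : List Int) : ∀ (ks : List Int) (owner : PySem.Dict Int (List Int)),
    altInner seq ks owner = none ↔ ∃ k ∈ ks, ∃ v, owner.get? k = some v ∧ v ≠ seq := by
  intro ks
  induction ks with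
  | nil => intro owner; simp [altInner]
  | cons k ks ih =>
    intro owner
    cases h : owner.get? k with
    | none =>
      simp only [altInner, h, ih]
      constructor
      · rintro ⟨x, hx, v, hv, hne⟩
        rw [PySem.Dict.get?_insert] at hv
        by_cases hxk : x = k
        · rw [if_pos hxk] at hv
          injection hv with hv
          exact absurd hv.symm hne
        · exact ⟨x, by simp [hx], v, by rwa [if_neg hxk] at hv, hne⟩
      · rintro ⟨x, hx, v, hv, hne⟩
        rcases List.mem_cons.mp hx with hxk | hx
        · rw [hxk, h] at hv; cases hv
        · refine ⟨x, hx, v, ?_, hne⟩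
          rw [PySem.Dict.get?_insert]
          by_cases hxk : x = k
          · rw [hxk, h] at hv; cases hv
          · rwa [if_neg hxk]
    | some prev =>
      simp only [altInner, h]
      by_cases hp : prev = seq
      · rw [if_neg (by simp [hp])]
        rw [ih]
        constructor
        · rintro ⟨x, hx, v, hv, hne⟩; exact ⟨x, by simp [hx], v, hv, hne⟩
        · rintro ⟨x, hx, v, hv, hne⟩
          rcases List.mem_cons.mp hx with hxk | hx
          · rw [hxk, h] at hv
            injection hv with hv
            exact absurd (hv ▸ hp) hne
          · exact ⟨x, hx, v, hv, hne⟩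
      · rw [if_pos hp]
        constructor
        · intro _; exact ⟨k, by simp, prev, h, hp⟩
        · intro _; rfl

-- inner loop: on success the dict gains first-ownership of seq's fresh elements
lemma altInner_some (seq : List Int) : ∀ (ks : List Int) (owner owner' : PySem.Dict Int (List Int)),
    altInner seq ks owner = some owner' →
    ∀ x, owner'.get? x = (owner.get? x).or (if x ∈ ks then some seq else none) := by
  intro ks
  induction ks with
  | nil =>
    intro owner owner' h x
    simp only [altInner, Option.some.injEq] at h
    subst h
    cases owner.get? x <;> simp [Option.or]
  | cons k ks ih =>
    intro owner owner' h x
    cases hk : owner.get? k with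
    | none =>
      simp only [altInner, hk] at h
      have hx' := ih _ _ h x
      rw [hx', PySem.Dict.get?_insert]
      by_cases hxk : x = k
      · subst hxk
        rw [hk, if_pos rfl]
        simp [Option.or]
      · rw [if_neg hxk]
        by_cases hx : x ∈ ks <;> simp [hx, hxk, List.mem_cons, Option.or]
    | some prev =>
      simp only [altInner, hk] at h
      by_cases hp : prev = seq
      · rw [if_neg (by simp [hp])] at h
        have hx' := ih _ _ h x
        rw [hx']
        by_cases hxk : x = k
        · subst hxk
          rw [hk, hp]
          simp [Option.or]
        · by_cases hx : x ∈ ks <;> simp [hx, hxk, List.mem_cons]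
      · rw [if_pos hp] at h; cases h

-- main invariant for the outer loop
lemma altOuter_iff : ∀ (rest : List (List Int)) (pre : List (List Int))
    (owner : PySem.Dict Int (List Int)),
    (∀ x, owner.get? x = fo pre x) → ¬ Share pre →
    (altOuter rest owner = true ↔ Share (pre ++ rest)) := by
  intro rest
  induction rest with
  | nil => intro pre owner _ hns; simp [altOuter]; simpa using hns
  | cons seq rest ih =>
    intro pre owner hmodel hns
    rw [altOuter]
    cases hinner : altInner seq seq owner with
    | none =>
      obtain ⟨k, hk, v, hv, hne⟩ := (altInner_none_iff seq seq owner).mp hinner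
      rw [hmodel] at hv
      obtain ⟨hvpre, hkv⟩ := fo_mem hv
      constructor
      · intro _
        exact ⟨v, by simp [hvpre], seq, by simp, hne, k, hkv, hk⟩
      · intro _; rfl
    | some owner' =>
      have hno : ∀ k ∈ seq, ∀ v, fo pre k = some v → v = seq := by
        intro k hk v hv
        by_contra hne
        have hcontra : altInner seq seq owner = none := by
          rw [altInner_none_iff]
          exact ⟨k, hk, v, by rw [hmodel]; exact hv, hne⟩
        rw [hcontra] at hinner; cases hinner
      have hmodel' : ∀ x, owner'.get? x = fo (pre ++ [seq]) x := by
        intro x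
        rw [altInner_some seq seq owner owner' hinner x, hmodel, fo_append_singleton]
      have hns' : ¬ Share (pre ++ [seq]) := by
        rintro ⟨i, hi, j, hj, hij, k, hki, hkj⟩
        have mem_or : ∀ x : List Int, x ∈ pre ++ [seq] → x ∈ pre ∨ x = seq := by
          intro x hx
          rcases List.mem_append.mp hx with h | h
          · exact Or.inl h
          · exact Or.inr (by simpa using h)
        rcases mem_or i hi with hip | hieq
        · rcases mem_or j hj with hjp | hjeq
          · exact hns ⟨i, hip, j, hjp, hij, k, hki, hkj⟩
          · cases hv : fo pre k with
            | none =>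
              have hsome := fo_isSome (l := pre) hip hki
              rw [hv] at hsome
              simp at hsome
            | some v =>
              have hveq := hno k (hjeq ▸ hkj) v hv
              obtain ⟨hvpre, hkv⟩ := fo_mem hv
              refine hns ⟨i, hip, v, hvpre, ?_, k, hki, hkv⟩
              rw [hveq, ← hjeq]; exact hij
        · rcases mem_or j hj with hjp | hjeq
          · cases hv : fo pre k with
            | none =>
              have hsome := fo_isSome (l := pre) hjp hkj
              rw [hv] at hsome
              simp at hsome
            | some v =>
              have hveq := hno k (hieq ▸ hki) v hv
              obtain ⟨hvpre, hkv⟩ := fo_mem hv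
              refine hns ⟨j, hjp, v, hvpre, ?_, k, hkj, hkv⟩
              rw [hveq, ← hieq]; exact hij.symm
          · exact hij (hieq.trans hjeq.symm)
      have hrec := ih (pre ++ [seq]) owner' hmodel' hns'
      show altOuter rest owner' = true ↔ Share (pre ++ seq :: rest)
      rw [hrec, List.append_assoc]
      simp

lemma checkB_iff (l : List (List Int)) : checkCoordVCs_alt l = true ↔ Share l := by
  unfold checkCoordVCs_alt
  have h := altOuter_iff l [] PySem.Dict.empty (by intro x; simp [fo, PySem.Dict.get?_empty])
    (by rintro ⟨i, hi, _⟩; simp at hi)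
  simpa using h

-- ===== VERDICT (by name: the statement is the Claim_ definition above) =====
theorem checkCoordVCs_spec : Claim_equal_checkCoordVCs := by
  intro l _
  unfold Spec_checkCoordVCs
  have hA := checkA_iff l
  have hB := checkB_iff l
  cases hA' : checkCoordVCs l <;> cases hB' : checkCoordVCs_alt l <;> simp_all
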